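-- pv_equiv track=rewrite | github.com/fjballest/rb | stackbar.py | _downsample_labels
-- ===== SOURCE A (Python) =====
-- def _downsample_labels(labels: list[str], max_labels: int):
-- 	if len(labels) <= max_labels:
-- 		return labels
--
-- 	step = max(1, len(labels) // max_labels)
-- 	return [
-- 		label if i % step == 0 else ""
-- 		for i, label in enumerate(labels)
-- 	]
-- ===== SOURCE B (Python) =====
-- def _downsample_labels(labels: list[str], max_labels: int):
--     if len(labels) <= max_labels:
--         return labels
--     step = max(1, len(labels) // max_labels)
--     out = []
--     n = len(labels)
--     i = 0
--     while i < n: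
--         out.append(labels[i])
--         nxt = min(i + step, n)
--         out.extend([""] * (nxt - i - 1))
--         i = nxt
--     return out
-- ===== Notes on version B (the rewrite author's own statement) =====
-- stated objective: alternative
-- what changed: Replaces A's enumerate-every-element masking comprehension (an i % step test per element) with a chunk-emission loop: repeatedly append the label at the current position, append a block of blanks for the rest of the chunk, and jump the position forward by step; no per-element modulo test.
import Mathlib
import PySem

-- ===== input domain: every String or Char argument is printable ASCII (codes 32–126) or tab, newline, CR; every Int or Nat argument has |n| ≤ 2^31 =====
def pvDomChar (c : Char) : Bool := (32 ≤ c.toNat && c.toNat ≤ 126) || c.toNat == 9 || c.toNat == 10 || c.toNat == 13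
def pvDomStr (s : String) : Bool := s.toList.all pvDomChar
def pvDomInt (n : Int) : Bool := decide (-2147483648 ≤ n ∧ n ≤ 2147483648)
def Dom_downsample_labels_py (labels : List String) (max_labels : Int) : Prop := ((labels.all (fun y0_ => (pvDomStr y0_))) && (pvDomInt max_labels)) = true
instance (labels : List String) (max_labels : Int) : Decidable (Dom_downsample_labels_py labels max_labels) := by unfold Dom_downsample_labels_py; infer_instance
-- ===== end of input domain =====

-- B replaces A's enumerate-and-mask comprehension (an i % step test per element) with a
-- chunk-emission loop: append the label at the current position plus a block of blanks,
-- then jump the position forward by step (alternative decomposition, same cost).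


-- ===== PORT A =====
def downsample_labels_py (labels : List String) (max_labels : Int) : List String :=
  if (labels.length : Int) ≤ max_labels then labels
  else
    let step := max 1 (PySem.Int.floordiv (labels.length : Int) max_labels)
    (PySem.List.enumerate labels).map (fun p => if PySem.Int.mod p.1 step = 0 then p.2 else "")

-- ===== PORT B =====
-- while i < n: out.append(labels[i]); out.extend([""] * (nxt - i - 1)); i = nxt,  nxt = min(i + step, n)
-- (recursion on the advancing index; 'max 1 step' only makes the recursion total — every call
--  from downsample_labels_py_alt has step ≥ 1, where max 1 step = step)
def chunkFrom (labels : List String) (step : Nat) (i : Nat) : List String :=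
  if i < labels.length then
    PySem.List.pyGetD labels (i : Int) "" ::
      (List.replicate (min (i + max 1 step) labels.length - i - 1) "" ++
        chunkFrom labels step (min (i + max 1 step) labels.length))
  else []
termination_by labels.length - i
decreasing_by omega

def downsample_labels_py_alt (labels : List String) (max_labels : Int) : List String :=
  if (labels.length : Int) ≤ max_labels then labels
  else
    let step := max 1 (PySem.Int.floordiv (labels.length : Int) max_labels)
    chunkFrom labels step.toNat 0

-- ===== PRECONDITION & SPEC =====
-- Pre_ excludes only the inputs where A raises ZeroDivisionError: a non-empty list with max_labels = 0.
def Pre_downsample_labels_py (labels : List String) (max_labels : Int) : Prop :=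
  labels = [] ∨ max_labels ≠ 0
instance (labels : List String) (max_labels : Int) : Decidable (Pre_downsample_labels_py labels max_labels) := by unfold Pre_downsample_labels_py; infer_instance
def pvWitness_downsample_labels_py : List String × Int := (["a", "b", "c", "d", "e"], 2)

def Spec_downsample_labels_py (labels : List String) (max_labels : Int) (out : List String) : Prop := out = downsample_labels_py_alt labels max_labels
instance (labels : List String) (max_labels : Int) (out : List String) : Decidable (Spec_downsample_labels_py labels max_labels out) := by unfold Spec_downsample_labels_py; infer_instance

-- ===== CLAIM (what is proved, stated in full; the proofs are below) =====
def Claim_equal_downsample_labels_py : Prop := ∀ (labels : List String) (max_labels : Int), Dom_downsample_labels_py labels max_labels → Pre_downsample_labels_py labels max_labels → Spec_downsample_labels_py labels max_labels (downsample_labels_py labels max_labels)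

-- ===== LEMMAS AND PROOFS =====

-- Proof helper: the chunk pass phrased structurally on the remaining list
-- (chunkFrom labels step i = chunkBlank step (labels.drop i), proved below).
def chunkBlank (step : Nat) : List String → List String
  | [] => []
  | x :: xs =>
      x :: (List.replicate (xs.take (step - 1)).length "" ++ chunkBlank step (xs.drop (step - 1)))
termination_by xs => xs.length
decreasing_by simp

theorem chunkFrom_eq_chunkBlank (labels : List String) (step : Nat) (hs : 1 ≤ step) (i : Nat) :
    chunkFrom labels step i = chunkBlank step (labels.drop i) := by
  induction i using chunkFrom.induct labels step with
  | case1 i hi ih =>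
      have hmax : max 1 step = step := by omega
      rw [chunkFrom, if_pos hi]
      simp only [hmax] at ih ⊢
      have hdropc : labels.drop i = labels[i] :: labels.drop (i + 1) :=
        List.drop_eq_getElem_cons hi
      rw [hdropc, chunkBlank]
      have hget : PySem.List.pyGetD labels (i : Int) "" = labels[i] := by
        rw [PySem.List.pyGetD_natCast, List.getD_eq_getElem _ _ hi]
      have hlen : ((labels.drop (i + 1)).take (step - 1)).length =
          min (i + step) labels.length - i - 1 := by
        simp; omega
      have hdrop2 : (labels.drop (i + 1)).drop (step - 1) =
          labels.drop (min (i + step) labels.length) := by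
        rw [List.drop_drop]
        by_cases h : i + step ≤ labels.length
        · rw [min_eq_left h]; congr 1; omega
        · rw [min_eq_right (by omega), List.drop_of_length_le (by omega),
              List.drop_of_length_le (by omega)]
      rw [hget, ih, hlen, hdrop2]
  | case2 i hi =>
      rw [chunkFrom]
      simp only [hi, if_false]
      rw [List.drop_of_length_le (by omega), chunkBlank]

theorem chunkBlank_length (step : Nat) (hs : 1 ≤ step) (xs : List String) :
    (chunkBlank step xs).length = xs.length := by
  induction xs using chunkBlank.induct step with
  | case1 => simp [chunkBlank]
  | case2 x xs ih =>
      rw [chunkBlank]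
      simp only [List.length_cons, List.length_append, List.length_replicate,
        List.length_take, List.length_drop, ih]
      omega

theorem chunkBlank_getD (step : Nat) (hs : 1 ≤ step) (xs : List String)
    (k : Nat) (hk : k < xs.length) :
    (chunkBlank step xs).getD k "" = if k % step = 0 then xs.getD k "" else "" := by
  induction xs using chunkBlank.induct step generalizing k with
  | case1 => simp at hk
  | case2 x xs ih =>
      rw [chunkBlank]
      rcases Nat.eq_zero_or_pos k with hk0 | hkpos
      · subst hk0; simp [Nat.zero_mod]
      · have hkle : k - 1 < xs.length := by simp at hk; omega
        have hgetc : (x :: (List.replicate (xs.take (step - 1)).length "" ++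
            chunkBlank step (xs.drop (step - 1)))).getD k "" =
            (List.replicate (xs.take (step - 1)).length "" ++
            chunkBlank step (xs.drop (step - 1))).getD (k - 1) "" := by
          cases k with
          | zero => omega
          | succ k' => simp
        rw [hgetc]
        set t := (xs.take (step - 1)).length with ht
        have htval : t = min (step - 1) xs.length := by simp [ht]
        by_cases hlt : k - 1 < t
        · -- inside the blank block: 1 ≤ k ≤ t ≤ step-1, so k % step = k ≠ 0
          have hmod : k % step = k := Nat.mod_eq_of_lt (by omega)
          rw [List.getD_append _ _ _ _ (by simpa using hlt)]
          simp [hmod]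
          omega
        · -- past the chunk: k ≥ step, recurse
          have hts : t = step - 1 := by
            rcases Nat.lt_or_ge xs.length (step - 1) with h | h
            · exfalso; omega
            · omega
          have hkstep : step ≤ k := by omega
          have hlen2 : k - step < (xs.drop (step - 1)).length := by
            simp [List.length_drop]; omega
          have hgapp : (List.replicate t "" ++ chunkBlank step (xs.drop (step - 1))).getD (k - 1) ""
              = (chunkBlank step (xs.drop (step - 1))).getD (k - 1 - t) "" := by
            rw [List.getD_append_right _ _ _ _ (by simp; omega)]
            simp
          rw [hgapp]
          have hidx : k - 1 - t = k - step := by omega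
          rw [hidx, ih (k - step) hlen2]
          have hmodeq : (k - step) % step = k % step := by
            conv_rhs => rw [show k = (k - step) + step by omega]
            simp [Nat.add_mod_right]
          rw [hmodeq]
          have hdropget : (xs.drop (step - 1)).getD (k - step) "" = xs.getD (k - 1) "" := by
            rw [List.getD_eq_getElem _ _ hlen2, List.getD_eq_getElem _ _ hkle]
            rw [List.getElem_drop]
            congr 1
            omega
          rw [hdropget]
          cases k with
          | zero => omega
          | succ k' => simp

-- A's comprehension, element by element.
theorem portA_getD (labels : List String) (s : Int) (k : Nat) (hk : k < labels.length) :
    ((PySem.List.enumerate labels).map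
        (fun p => if PySem.Int.mod p.1 s = 0 then p.2 else "")).getD k "" =
      if PySem.Int.mod (k : Int) s = 0 then labels.getD k "" else "" := by
  have hk' : k < (PySem.List.enumerate labels 0).length := by
    rw [PySem.List.length_enumerate]; exact hk
  rw [List.getD_eq_getElem _ "" (by simpa using hk'), List.getElem_map,
      PySem.List.getElem_enumerate labels 0 k hk', List.getD_eq_getElem labels "" hk]
  simp

theorem main_chunk (labels : List String) (s : Int) (hs : 0 < s) :
    chunkBlank s.toNat labels =
      (PySem.List.enumerate labels).map (fun p => if PySem.Int.mod p.1 s = 0 then p.2 else "") := by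
  have hs1 : 1 ≤ s.toNat := by omega
  apply List.ext_getElem
  · rw [chunkBlank_length s.toNat hs1]; simp [PySem.List.length_enumerate]
  · intro k h1 h2
    have hk : k < labels.length := by rwa [chunkBlank_length s.toNat hs1] at h1
    have hA := portA_getD labels s k hk
    have hB := chunkBlank_getD s.toNat hs1 labels k hk
    rw [List.getD_eq_getElem _ "" h1] at hB
    rw [List.getD_eq_getElem _ "" h2] at hA
    rw [hB, hA]
    have hiff : PySem.Int.mod (k : Int) s = 0 ↔ k % s.toNat = 0 := by
      have hst : (s.toNat : Int) = s := Int.toNat_of_nonneg (le_of_lt hs)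
      rw [PySem.Int.mod_eq_zero_iff_dvd, ← hst, Int.natCast_dvd_natCast]
      exact Nat.dvd_iff_mod_eq_zero
    by_cases hm : k % s.toNat = 0
    · simp [hm, hiff.mpr hm]
    · have hm' : ¬ PySem.Int.mod (k : Int) s = 0 := fun h => hm (hiff.mp h)
      simp [hm, hm']

-- ===== VERDICT (by name: the statement is the Claim_ definition above) =====
theorem downsample_labels_py_spec : Claim_equal_downsample_labels_py := by
  intro labels max_labels _ _
  unfold Spec_downsample_labels_py downsample_labels_py downsample_labels_py_alt
  by_cases h : (labels.length : Int) ≤ max_labels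
  · simp [h]
  · simp only [h, if_false]
    rw [chunkFrom_eq_chunkBlank labels _ (by simp) 0, List.drop_zero]
    exact (main_chunk labels _ (by positivity)).symm
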